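-- pv_equiv track=rewrite | github.com/alexwday/rbc-intel | document_pipeline/src/ingestion/utils/content_chunker.py | _find_blank_line_near_midpoint
-- ===== SOURCE A (Python) =====
-- def _find_blank_line_near_midpoint(
--     lines: list[str],
-- ) -> int:
--     """Find blank line nearest to midpoint. Returns: line index."""
--     mid = len(lines) // 2
--     for offset in range(len(lines)):
--         for candidate in (mid + offset, mid - offset):
--             if 0 < candidate < len(lines):
--                 if not lines[candidate].strip():
--                     return candidate
--     return mid
-- ===== SOURCE B (Python) =====
-- def _find_blank_line_near_midpoint(
--     lines: list[str],
-- ) -> int: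
--     """Find blank line nearest to midpoint. Returns: line index."""
--     mid = len(lines) // 2
--     blanks = [i for i in range(1, len(lines)) if not lines[i].strip()]
--     if not blanks:
--         return mid
--     return min(blanks, key=lambda i: (abs(i - mid), -i))
-- ===== Notes on version B (the rewrite author's own statement) =====
-- stated objective: simpler
-- what changed: Replaces the expanding two-sided offset search (nested loops with early return) by one pass collecting all blank-line indices and a single min() with key (abs(i-mid), -i), whose tie-break toward the larger index reproduces A's check order.
import Mathlib
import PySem

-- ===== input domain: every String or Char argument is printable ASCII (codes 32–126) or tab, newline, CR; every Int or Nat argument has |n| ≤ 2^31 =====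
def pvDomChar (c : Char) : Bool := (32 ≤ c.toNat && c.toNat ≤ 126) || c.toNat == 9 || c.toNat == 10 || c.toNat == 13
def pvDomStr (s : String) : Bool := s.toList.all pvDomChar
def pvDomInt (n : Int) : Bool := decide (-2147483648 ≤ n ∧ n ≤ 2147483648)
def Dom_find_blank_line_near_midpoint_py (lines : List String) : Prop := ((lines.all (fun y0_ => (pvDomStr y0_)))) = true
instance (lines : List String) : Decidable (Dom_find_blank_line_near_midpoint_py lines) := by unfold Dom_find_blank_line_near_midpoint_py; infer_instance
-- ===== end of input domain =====

-- B replaces A's expanding two-sided offset search by one pass collecting blank indices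
-- plus a single min() with key (abs(i-mid), -i); objective: simpler.

-- shared helper: Python's 'not lines[i].strip()' (the index is guarded to be in range
-- wherever this is used, so pyGetD with a default is exact)
def pvBlank (lines : List String) (i : Int) : Bool :=
  PySem.Str.strip (PySem.List.pyGetD lines i "") == ""

-- ===== PORT A =====
def find_blank_line_near_midpoint_py (lines : List String) : Int :=
  let n : Int := PySem.List.len lines
  let mid : Int := PySem.Int.floordiv n 2
  match (PySem.List.pyRange 0 n 1).findSome? (fun off =>
      [mid + off, mid - off].findSome? (fun c =>
        if 0 < c ∧ c < n then (if pvBlank lines c then some c else none) else none)) with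
  | some c => c
  | none => mid

-- ===== PORT B =====
def find_blank_line_near_midpoint_py_alt (lines : List String) : Int :=
  let n : Int := PySem.List.len lines
  let mid : Int := PySem.Int.floordiv n 2
  let blanks := (PySem.List.pyRange 1 n 1).filter (fun i => pvBlank lines i)
  match PySem.List.min2? blanks (fun i => |i - mid|) (fun i => -i) with
  | none => mid
  | some m => m

-- ===== PRECONDITION & SPEC =====
def Spec_find_blank_line_near_midpoint_py (lines : List String) (out : Int) : Prop := out = find_blank_line_near_midpoint_py_alt lines
instance (lines : List String) (out : Int) : Decidable (Spec_find_blank_line_near_midpoint_py lines out) := by unfold Spec_find_blank_line_near_midpoint_py; infer_instance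

-- ===== CLAIM (what is proved, stated in full; the proofs are below) =====
def Claim_equal_find_blank_line_near_midpoint_py : Prop := ∀ (lines : List String), Dom_find_blank_line_near_midpoint_py lines → Spec_find_blank_line_near_midpoint_py lines (find_blank_line_near_midpoint_py lines)

-- ===== LEMMAS AND PROOFS =====

-- the fold step of PySem.List.min2?, with Prop-valued branch condition
def pvStep {α : Type} (k1 k2 : α → Int) (acc : Option α) (x : α) : Option α :=
  match acc with
  | none => some x
  | some m => if k1 x < k1 m ∨ (¬ (k1 m < k1 x) ∧ k2 x < k2 m) then some x else some m

theorem pvMin2_eq_foldl {α : Type} (k1 k2 : α → Int) (xs : List α) :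
    PySem.List.min2? xs k1 k2 = xs.foldl (pvStep k1 k2) none := by
  unfold PySem.List.min2?
  congr 1
  funext acc x
  cases acc with
  | none => rfl
  | some m =>
    simp only [pvStep, Bool.or_eq_true, Bool.and_eq_true, Bool.not_eq_true',
      decide_eq_true_eq, decide_eq_false_iff_not]

-- invariant of the min2? fold started at `some a`: the result is lexicographically
-- (k1, k2)-minimal among a and the traversed elements
theorem pvFold_some {α : Type} (k1 k2 : α → Int) :
    ∀ (xs : List α) (a : α), ∃ m, xs.foldl (pvStep k1 k2) (some a) = some m ∧
      (m = a ∨ m ∈ xs) ∧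
      (k1 m < k1 a ∨ (k1 m ≤ k1 a ∧ k2 m ≤ k2 a)) ∧
      (∀ y ∈ xs, k1 m < k1 y ∨ (k1 m ≤ k1 y ∧ k2 m ≤ k2 y)) := by
  intro xs
  induction xs with
  | nil => intro a; exact ⟨a, rfl, Or.inl rfl, Or.inr ⟨le_refl _, le_refl _⟩, by simp⟩
  | cons x t ih =>
    intro a
    simp only [List.foldl_cons]
    by_cases h : k1 x < k1 a ∨ (¬ (k1 a < k1 x) ∧ k2 x < k2 a)
    · have hs : pvStep k1 k2 (some a) x = some x := by simp only [pvStep]; rw [if_pos h]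
      rw [hs]
      obtain ⟨m, hm, hmem, hle, hall⟩ := ih x
      refine ⟨m, hm, ?_, ?_, ?_⟩
      · rcases hmem with rfl | hmem
        · exact Or.inr (List.mem_cons_self ..)
        · exact Or.inr (List.mem_cons_of_mem _ hmem)
      · rcases h with h | h <;> rcases hle with hle | hle <;> omega
      · intro y hy
        rcases List.mem_cons.mp hy with rfl | hy
        · exact hle
        · exact hall y hy
    · have hs : pvStep k1 k2 (some a) x = some a := by simp only [pvStep]; rw [if_neg h]
      rw [hs]
      obtain ⟨m, hm, hmem, hle, hall⟩ := ih a
      refine ⟨m, hm, ?_, hle, ?_⟩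
      · rcases hmem with rfl | hmem
        · exact Or.inl rfl
        · exact Or.inr (List.mem_cons_of_mem _ hmem)
      · intro y hy
        rcases List.mem_cons.mp hy with rfl | hy
        · rcases hle with hle | hle
          · left; omega
          · rcases lt_or_ge (k1 m) (k1 y) with hc | hc
            · exact Or.inl hc
            · right; omega
        · exact hall y hy

-- the heart of the equivalence, over an abstract blank test p and the midpoint facts
theorem pvCore (p : Int → Bool) (n mid : Int) (hn : 0 ≤ n) (h1 : 2 * mid ≤ n) (h2 : n ≤ 2 * mid + 1) :
    (match (PySem.List.pyRange 0 n 1).findSome? (fun off =>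
        [mid + off, mid - off].findSome? (fun c =>
          if 0 < c ∧ c < n then (if p c then some c else none) else none)) with
     | some c => c
     | none => mid)
    = (match ((PySem.List.pyRange 1 n 1).filter p).foldl
          (pvStep (fun i => |i - mid|) (fun i => -i)) none with
       | none => mid
       | some m => m) := by
  have hmem : ∀ i : Int, i ∈ (PySem.List.pyRange 1 n 1).filter p ↔ (1 ≤ i ∧ i < n) ∧ p i = true := by
    intro i
    simp [List.mem_filter, PySem.List.mem_pyRange_one]
  set f : Int → Option Int := fun off =>
      [mid + off, mid - off].findSome? (fun c =>
        if 0 < c ∧ c < n then (if p c then some c else none) else none) with hf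
  cases hb : (PySem.List.pyRange 1 n 1).filter p with
  | nil =>
    -- no blank line at an index 1..n-1: A's search finds nothing, both return mid
    have hnone : (PySem.List.pyRange 0 n 1).findSome? f = none := by
      rw [List.findSome?_eq_none_iff]
      intro off hoff
      have hcand : ∀ c : Int, (if 0 < c ∧ c < n then (if p c then some c else none) else none) = none := by
        intro c
        split_ifs with hc hp
        · exfalso
          have : c ∈ (PySem.List.pyRange 1 n 1).filter p := (hmem c).mpr ⟨⟨by omega, hc.2⟩, hp⟩
          rw [hb] at this; exact absurd this (List.not_mem_nil)
        · rfl
        · rfl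
      simp only [hf, List.findSome?_cons, List.findSome?_nil, hcand]
    rw [hnone]
    rfl
  | cons b0 bt =>
    -- a blank exists: B picks m, the (abs(i-mid), -i)-minimal blank; A reaches it at offset |m-mid|
    obtain ⟨m, hm, hmemm, hle0, hall⟩ := pvFold_some (fun i => |i - mid|) (fun i => -i) bt b0
    have hmmem : m ∈ (PySem.List.pyRange 1 n 1).filter p := by
      rw [hb]; rcases hmemm with rfl | h
      · exact List.mem_cons_self ..
      · exact List.mem_cons_of_mem _ h
    have hmin : ∀ y : Int, (1 ≤ y ∧ y < n) → p y = true →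
        (|m - mid| < |y - mid| ∨ (|m - mid| ≤ |y - mid| ∧ y ≤ m)) := by
      intro y hy hp
      have hymem : y ∈ (PySem.List.pyRange 1 n 1).filter p := (hmem y).mpr ⟨hy, hp⟩
      rw [hb] at hymem
      rcases List.mem_cons.mp hymem with rfl | hymem
      · rcases hle0 with h | h <;> omega
      · rcases hall y hymem with h | h <;> omega
    obtain ⟨⟨hm1, hm2⟩, hpm⟩ := (hmem m).mp hmmem
    rw [List.foldl_cons]
    have hstep0 : pvStep (fun i => |i - mid|) (fun i => -i) none b0 = some b0 := rfl
    rw [hstep0, hm]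
    -- A returns m as well: every offset below |m - mid| yields no candidate,
    -- and at offset |m - mid| the first accepted candidate is exactly m
    set t : Int := |m - mid| with htdef
    have ht0 : 0 ≤ t := abs_nonneg _
    have htabs : t = m - mid ∨ (t = mid - m ∧ 0 < t) := by
      rcases abs_cases (m - mid) with ⟨h, h'⟩ | ⟨h, h'⟩
      · left; omega
      · right; omega
    have htn : t < n := by rcases htabs with h | h <;> omega
    have hsplit : PySem.List.pyRange 0 n 1 = PySem.List.pyRange 0 t 1 ++ PySem.List.pyRange t n 1 :=
      PySem.List.pyRange_one_append 0 t n ht0 (by omega)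
    have hfirst : (PySem.List.pyRange 0 t 1).findSome? f = none := by
      rw [List.findSome?_eq_none_iff]
      intro off hoff
      rw [PySem.List.mem_pyRange_one] at hoff
      have hcand : ∀ c : Int, |c - mid| = off →
          (if 0 < c ∧ c < n then (if p c then some c else none) else none) = none := by
        intro c hc
        split_ifs with hcr hp
        · exfalso
          rcases hmin c ⟨by omega, hcr.2⟩ hp with h' | h' <;> omega
        · rfl
        · rfl
      have c1 : |(mid + off) - mid| = off := by
        rw [show mid + off - mid = off by ring]; exact abs_of_nonneg hoff.1
      have c2 : |(mid - off) - mid| = off := by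
        rw [show mid - off - mid = -off by ring, abs_neg]; exact abs_of_nonneg hoff.1
      simp only [hf, List.findSome?_cons, List.findSome?_nil, hcand _ c1, hcand _ c2]
    have hat : f t = some m := by
      rcases htabs with h | h
      · -- m = mid + t: the first candidate is m itself
        have hmeq : mid + t = m := by omega
        have hcr : (0 : Int) < mid + t ∧ mid + t < n := by omega
        have hc : (if 0 < mid + t ∧ mid + t < n then (if p (mid + t) then some (mid + t) else none) else none) = some m := by
          rw [if_pos hcr, hmeq, if_pos hpm]
        simp only [hf, List.findSome?_cons, hc]
      · -- m = mid - t with 0 < t: the first candidate mid + t is no blank in range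
        obtain ⟨h, htpos⟩ := h
        have hmeq : mid - t = m := by omega
        have hc1 : (if 0 < mid + t ∧ mid + t < n then (if p (mid + t) then some (mid + t) else none) else none) = none := by
          split_ifs with hcr hp
          · exfalso
            have habs : |(mid + t) - mid| = t := by
              rw [show mid + t - mid = t by ring]; exact abs_of_nonneg ht0
            rcases hmin (mid + t) ⟨by omega, hcr.2⟩ hp with h' | h' <;> omega
          · rfl
          · rfl
        have hcr2 : (0 : Int) < mid - t ∧ mid - t < n := by omega
        have hc2 : (if 0 < mid - t ∧ mid - t < n then (if p (mid - t) then some (mid - t) else none) else none) = some m := by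
          rw [if_pos hcr2, hmeq, if_pos hpm]
        simp only [hf, List.findSome?_cons, List.findSome?_nil, hc1, hc2]
    rw [hsplit, List.findSome?_append, hfirst, PySem.List.pyRange_one_cons (by omega : t < n)]
    simp only [Option.none_or, List.findSome?_cons, hat]

-- ===== VERDICT (by name: the statement is the Claim_ definition above) =====
theorem find_blank_line_near_midpoint_py_spec : Claim_equal_find_blank_line_near_midpoint_py := by
  intro lines _
  unfold Spec_find_blank_line_near_midpoint_py
  have hn : (0 : Int) ≤ PySem.List.len lines := by simp [PySem.List.len_eq]
  have hdiv := (PySem.Int.floordiv_eq_iff_of_pos (a := PySem.List.len lines) (b := 2)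
      (q := PySem.Int.floordiv (PySem.List.len lines) 2) (by norm_num)).mp rfl
  have key := pvCore (fun i => pvBlank lines i) (PySem.List.len lines)
      (PySem.Int.floordiv (PySem.List.len lines) 2) hn (by omega) (by omega)
  have halt : find_blank_line_near_midpoint_py_alt lines
      = (match ((PySem.List.pyRange 1 (PySem.List.len lines) 1).filter (fun i => pvBlank lines i)).foldl
          (pvStep (fun i => |i - PySem.Int.floordiv (PySem.List.len lines) 2|) (fun i => -i)) none with
         | none => PySem.Int.floordiv (PySem.List.len lines) 2
         | some m => m) := by
    show (match PySem.List.min2? ((PySem.List.pyRange 1 (PySem.List.len lines) 1).filter (fun i => pvBlank lines i))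
            (fun i => |i - PySem.Int.floordiv (PySem.List.len lines) 2|) (fun i => -i) with
          | none => PySem.Int.floordiv (PySem.List.len lines) 2
          | some m => m) = _
    rw [pvMin2_eq_foldl]
  rw [halt]
  exact key
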